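-- pv_equiv track=rewrite | github.com/davidecavestro/streamlit-ssh-config-editor | streamlit_app.py | parse_ssh_config
-- ===== SOURCE A (Python) =====
-- def parse_ssh_config(config_lines):
--     config_blocks = []
--     current_block = {}
--
--     for line in config_lines:
--         line = line.strip()
--         if line.startswith("Host "):
--             if current_block:
--                 config_blocks.append(current_block)
--                 current_block = {}
--             current_block["Host"] = line.split()[1]
--         elif line.startswith("#"):
--             # ignore it
--             continue
--         elif line:
--             key, value = line.split(None, 1)
--             current_block[key] = value
--
--     if current_block:
--         config_blocks.append(current_block)
--
--     return config_blocks
-- ===== SOURCE B (Python) =====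
-- def parse_ssh_config(config_lines):
--     # Two-phase: split stripped lines into segments at "Host " lines, then build a dict per segment.
--     stripped = [line.strip() for line in config_lines]
--     segments = []
--     seg = []
--     for l in stripped:
--         if l.startswith("Host "):
--             segments.append(seg)
--             seg = [l]
--         else:
--             seg.append(l)
--     segments.append(seg)
--
--     blocks = []
--     for seg in segments:
--         d = {}
--         for l in seg:
--             if l.startswith("Host "):
--                 d["Host"] = l.split()[1]
--             elif l and not l.startswith("#"):
--                 key, value = l.split(None, 1)
--                 d[key] = value
--         if d:
--             blocks.append(d)
--     return blocks
-- ===== Notes on version B (the rewrite author's own statement) =====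
-- stated objective: alternative
-- what changed: B replaces A's single flush-on-the-fly loop (one dict accumulator appended whenever a new 'Host ' line or the end of input is reached) by two phases: first split the stripped lines into segments at 'Host ' lines (plus a leading Host-less segment), then build one dict per segment and keep the non-empty ones.
import Mathlib
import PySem

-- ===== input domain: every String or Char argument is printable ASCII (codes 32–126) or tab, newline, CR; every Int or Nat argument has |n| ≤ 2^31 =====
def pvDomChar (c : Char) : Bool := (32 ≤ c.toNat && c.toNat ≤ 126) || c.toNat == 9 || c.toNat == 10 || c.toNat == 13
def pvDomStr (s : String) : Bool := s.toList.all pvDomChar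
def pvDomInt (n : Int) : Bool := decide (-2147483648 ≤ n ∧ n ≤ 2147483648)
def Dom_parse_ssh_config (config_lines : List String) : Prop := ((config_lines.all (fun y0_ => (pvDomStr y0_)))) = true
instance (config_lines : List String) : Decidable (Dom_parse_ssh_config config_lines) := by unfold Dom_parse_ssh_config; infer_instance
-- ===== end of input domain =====

-- B re-partitions the work into two phases (segment split at "Host " lines, then a dict built per
-- segment) instead of A's single flush-on-the-fly accumulator loop; same cost (objective: alternative).

-- ===== PORT A =====
-- shared low-level string helpers (both Pythons call l.split()[1] and l.split(None, 1))
-- l.split()[1]; the none case (fewer than 2 tokens) is unreachable on a stripped line starting "Host "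
def pvTok1 (l : String) : String := (PySem.List.pyGet? (PySem.Str.split₀ l) 1).getD ""
-- key, value = l.split(None, 1); none = ValueError on a one-token line (excluded by Pre_)
def pvKV? (l : String) : Option (String × String) :=
  match PySem.Str.split₀Max l 1 with
  | [k, v] => some (k, v)
  | _ => none

-- A's loop body, named so the proofs can speak about it
def pvAStep (st : List (PySem.Dict String String) × PySem.Dict String String) (line : String) :
    List (PySem.Dict String String) × PySem.Dict String String :=
  let l := PySem.Str.strip line
  if PySem.Str.startswith l "Host " then
    if st.2.items = [] then (st.1, st.2.insert "Host" (pvTok1 l))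
    else (st.1 ++ [st.2], (PySem.Dict.empty).insert "Host" (pvTok1 l))
  else if PySem.Str.startswith l "#" then st
  else if l ≠ "" then
    match pvKV? l with
    | some (k, v) => (st.1, st.2.insert k v)
    | none => st   -- ValueError in Python; outside Pre_
  else st

def parse_ssh_config (config_lines : List String) : List (List (String × String)) :=
  let st := config_lines.foldl pvAStep ([], PySem.Dict.empty)
  let blocks := if st.2.items = [] then st.1 else st.1 ++ [st.2]
  blocks.map (fun d => d.items)

-- ===== PORT B =====
-- phase 1 step: start a new segment at each stripped "Host " line
def pvBSegStep (p : List (List String) × List String) (l : String) :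
    List (List String) × List String :=
  if PySem.Str.startswith l "Host " then (p.1 ++ [p.2], [l]) else (p.1, p.2 ++ [l])

-- phase 2 inner step: one (already stripped) line into the segment's dict
def pvBLineStep (d : PySem.Dict String String) (l : String) : PySem.Dict String String :=
  if PySem.Str.startswith l "Host " then d.insert "Host" (pvTok1 l)
  else if l ≠ "" ∧ PySem.Str.startswith l "#" = false then
    match pvKV? l with
    | some (k, v) => d.insert k v
    | none => d   -- ValueError in Python; outside Pre_
  else d

def pvBBuild (seg : List String) : PySem.Dict String String :=
  seg.foldl pvBLineStep PySem.Dict.empty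

def pvBBlockStep (blocks : List (PySem.Dict String String)) (seg : List String) :
    List (PySem.Dict String String) :=
  let d := pvBBuild seg
  if d.items = [] then blocks else blocks ++ [d]

def parse_ssh_config_alt (config_lines : List String) : List (List (String × String)) :=
  let stripped := config_lines.map PySem.Str.strip
  let p := stripped.foldl pvBSegStep ([], [])
  let segments := p.1 ++ [p.2]
  let blocks := segments.foldl pvBBlockStep []
  blocks.map (fun d => d.items)

-- ===== PRECONDITION & SPEC =====
-- Pre_ excludes exactly the inputs on which Python A raises ValueError: some stripped line that is
-- non-empty, not a comment and not a "Host " line contains no whitespace (a single token), so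
-- `key, value = line.split(None, 1)` fails (in both A and B).
def Pre_parse_ssh_config (config_lines : List String) : Prop :=
  ∀ line ∈ config_lines,
    ((PySem.Str.strip line) ≠ "" →
     PySem.Str.startswith (PySem.Str.strip line) "#" = false →
     PySem.Str.startswith (PySem.Str.strip line) "Host " = false →
     (PySem.Str.strip line).toList.any
       (fun c => c == ' ' || c == '\t' || c == '\n' || c == '\r') = true)
instance (config_lines : List String) : Decidable (Pre_parse_ssh_config config_lines) := by
  unfold Pre_parse_ssh_config; infer_instance
def pvWitness_parse_ssh_config : List String :=
  ["User alice", "Host h1", "  Port 22 ", "# comment", "", "Host h2 extra", "IdentityFile a b"]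

def Spec_parse_ssh_config (config_lines : List String) (out : List (List (String × String))) : Prop := out = parse_ssh_config_alt config_lines
instance (config_lines : List String) (out : List (List (String × String))) : Decidable (Spec_parse_ssh_config config_lines out) := by unfold Spec_parse_ssh_config; infer_instance

-- ===== CLAIM (what is proved, stated in full; the proofs are below) =====
def Claim_equal_parse_ssh_config : Prop := ∀ (config_lines : List String), Dom_parse_ssh_config config_lines → Pre_parse_ssh_config config_lines → Spec_parse_ssh_config config_lines (parse_ssh_config config_lines)

-- ===== LEMMAS AND PROOFS =====

-- canonical recursive form both ports are reduced to (over the STRIPPED lines)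
def pvParseRec : List String → PySem.Dict String String → List (PySem.Dict String String)
  | [], cur => if cur.items = [] then [] else [cur]
  | l :: ls, cur =>
    if PySem.Str.startswith l "Host " then
      (if cur.items = [] then [] else [cur]) ++
        pvParseRec ls ((PySem.Dict.empty).insert "Host" (pvTok1 l))
    else pvParseRec ls (pvBLineStep cur l)

-- recursive form of B's segment split
def pvSegsOf : List String → List String → List (List String)
  | seg, [] => [seg]
  | seg, l :: ls =>
    if PySem.Str.startswith l "Host " then seg :: pvSegsOf [l] ls
    else pvSegsOf (seg ++ [l]) ls

-- recursive form of B's block-collecting fold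
def pvF : List (List String) → List (PySem.Dict String String)
  | [] => []
  | s :: sl => (if (pvBBuild s).items = [] then [] else [pvBBuild s]) ++ pvF sl

-- an empty-items dict is the empty dict
theorem pvDict_eq_empty_of_items_nil (d : PySem.Dict String String) (h : d.items = []) :
    d = PySem.Dict.empty := by
  apply PySem.Dict.ext; simpa using h

-- A's non-host branch equals B's line step
theorem pvAStep_nonhost (st : List (PySem.Dict String String) × PySem.Dict String String)
    (line : String) (h : PySem.Str.startswith (PySem.Str.strip line) "Host " = false) :
    pvAStep st line = (st.1, pvBLineStep st.2 (PySem.Str.strip line)) := by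
  simp only [pvAStep, pvBLineStep]
  rw [h]
  by_cases hc : PySem.Str.startswith (PySem.Str.strip line) "#" = true
  · rw [hc]; simp
  · rw [Bool.not_eq_true] at hc
    rw [hc]
    by_cases he : PySem.Str.strip line = ""
    · rw [he]; simp
    · cases pvKV? (PySem.Str.strip line) with
      | none => simp [he]
      | some kv => simp [he]

-- A's loop (with its final flush) computes pvParseRec of the stripped lines
set_option maxHeartbeats 1000000 in
theorem pvLA (ls : List String) (blocks : List (PySem.Dict String String))
    (cur : PySem.Dict String String) :
    (if (ls.foldl pvAStep (blocks, cur)).2.items = []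
      then (ls.foldl pvAStep (blocks, cur)).1
      else (ls.foldl pvAStep (blocks, cur)).1 ++ [(ls.foldl pvAStep (blocks, cur)).2])
    = blocks ++ pvParseRec (ls.map PySem.Str.strip) cur := by
  induction ls generalizing blocks cur with
  | nil =>
    simp only [List.foldl_nil, List.map_nil, pvParseRec]
    by_cases h : cur.items = [] <;> simp [h]
  | cons l ls ih =>
    rw [List.map_cons, pvParseRec, List.foldl_cons]
    by_cases hh : PySem.Str.startswith (PySem.Str.strip l) "Host " = true
    · by_cases he : cur.items = []
      · have hcur := pvDict_eq_empty_of_items_nil cur he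
        have h1 : pvAStep (blocks, cur) l
            = (blocks, (PySem.Dict.empty).insert "Host" (pvTok1 (PySem.Str.strip l))) := by
          simp only [pvAStep]
          rw [if_pos hh]
          rw [if_pos he, hcur]
        rw [h1, ih, if_pos hh, if_pos he, List.nil_append]
      · have h1 : pvAStep (blocks, cur) l
            = (blocks ++ [cur], (PySem.Dict.empty).insert "Host" (pvTok1 (PySem.Str.strip l))) := by
          simp only [pvAStep]
          rw [if_pos hh]
          rw [if_neg he]
        rw [h1, ih, if_pos hh, if_neg he, List.append_assoc]
    · simp only [Bool.not_eq_true] at hh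
      rw [pvAStep_nonhost (blocks, cur) l hh, ih, if_neg (by rw [hh]; simp)]

-- B's phase-1 fold computes pvSegsOf
theorem pvLB1 (ls : List String) (segs : List (List String)) (seg : List String) :
    (ls.foldl pvBSegStep (segs, seg)).1 ++ [(ls.foldl pvBSegStep (segs, seg)).2]
    = segs ++ pvSegsOf seg ls := by
  induction ls generalizing segs seg with
  | nil => simp [pvSegsOf]
  | cons l ls ih =>
    simp only [List.foldl_cons, pvSegsOf]
    by_cases hh : PySem.Str.startswith l "Host " = true
    · rw [show pvBSegStep (segs, seg) l = (segs ++ [seg], [l]) from by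
        simp only [pvBSegStep, hh]; simp]
      rw [ih, hh]; simp
    · simp only [Bool.not_eq_true] at hh
      rw [show pvBSegStep (segs, seg) l = (segs, seg ++ [l]) from by
        simp only [pvBSegStep, hh]; simp]
      rw [ih, hh]; simp

-- B's phase-2 fold computes pvF
theorem pvLB2 (sl : List (List String)) (blocks : List (PySem.Dict String String)) :
    sl.foldl pvBBlockStep blocks = blocks ++ pvF sl := by
  induction sl generalizing blocks with
  | nil => simp [pvF]
  | cons s sl ih =>
    simp only [List.foldl_cons, pvF]
    by_cases h : (pvBBuild s).items = []
    · rw [show pvBBlockStep blocks s = blocks from by simp only [pvBBlockStep, h]; simp]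
      rw [ih]; simp [h]
    · rw [show pvBBlockStep blocks s = blocks ++ [pvBBuild s] from by
        simp only [pvBBlockStep]; simp [h]]
      rw [ih]; simp [h]

-- collecting the blocks of the segments is pvParseRec with the open segment's dict
theorem pvLC (ls seg : List String) :
    pvF (pvSegsOf seg ls) = pvParseRec ls (pvBBuild seg) := by
  induction ls generalizing seg with
  | nil => simp [pvSegsOf, pvF, pvParseRec]
  | cons l ls ih =>
    simp only [pvSegsOf, pvParseRec]
    by_cases hh : PySem.Str.startswith l "Host " = true
    · have h1 : pvBBuild [l] = (PySem.Dict.empty).insert "Host" (pvTok1 l) := by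
        show pvBLineStep PySem.Dict.empty l = _
        simp only [pvBLineStep]; rw [hh]; simp
      rw [hh]
      simp [pvF, ih, h1]
    · simp only [Bool.not_eq_true] at hh
      have h1 : pvBBuild (seg ++ [l]) = pvBLineStep (pvBBuild seg) l := by
        unfold pvBBuild; simp
      rw [hh]
      simp [ih, h1]

-- ===== VERDICT (by name: the statement is the Claim_ definition above) =====
theorem parse_ssh_config_spec : Claim_equal_parse_ssh_config := by
  intro cl _ _
  unfold Spec_parse_ssh_config parse_ssh_config parse_ssh_config_alt
  simp only []
  rw [pvLA cl [] PySem.Dict.empty, pvLB1 (cl.map PySem.Str.strip) [] [], pvLB2]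
  simp only [List.nil_append]
  rw [pvLC (cl.map PySem.Str.strip) []]
  rfl
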